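-- pv_equiv track=rewrite | github.com/wzygxr/shuati | class054_DynamicProgramming_SubsequenceAndKnapsackProblems/LeetCode1178_Number_of_Valid_Words_for_Each_Puzzle.py | findNumOfValidWordsOptimized
-- ===== SOURCE A (Python) =====
-- from collections import Counter
--
-- def findNumOfValidWordsOptimized(words, puzzles):
--     """
--     计算每个谜面有多少个单词可以作为谜底（优化版本）
--
--     Args:
--         words (List[str]): 单词列表
--         puzzles (List[str]): 谜面列表
--
--     Returns:
--         List[int]: 每个谜面对应的匹配单词数量
--     """
--     # 异常处理：检查输入参数的有效性
--     if not words or not puzzles: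
--         return []
--
--     # 使用Counter统计每个位掩码出现的次数
--     word_count = Counter()
--
--     # 将每个单词转换为位掩码并统计
--     for word in words:
--         mask = 0
--         for ch in word:
--             # 将每个字母对应到一个位上
--             mask |= 1 << (ord(ch) - ord('a'))
--         # 统计该位掩码出现的次数
--         word_count[mask] += 1
--
--     result = []
--
--     # 处理每个谜面
--     for puzzle in puzzles:
--         count = 0
--
--         # 获取谜面的第一个字母对应的位
--         first_letter = 1 << (ord(puzzle[0]) - ord('a'))
--
--         # 获取谜面的位掩码
--         puzzle_mask = 0
--         for ch in puzzle:
--             puzzle_mask |= 1 << (ord(ch) - ord('a'))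
--
--         # 枚举谜面的所有子集
--         subset = puzzle_mask
--         while subset > 0:
--             # 检查子集是否包含谜面的第一个字母
--             if (subset & first_letter) != 0:
--                 # 如果包含，则统计对应的单词数量
--                 count += word_count[subset]
--             # 枚举下一个子集
--             subset = (subset - 1) & puzzle_mask
--
--         result.append(count)
--
--     return result
-- ===== SOURCE B (Python) =====
-- from collections import Counter
--
-- def findNumOfValidWordsOptimized(words, puzzles):
--     if not words or not puzzles:
--         return []
--
--     def _mask(s):
--         m = 0
--         for ch in s:
--             m |= 1 << (ord(ch) - ord('a'))
--         return m
--
--     word_count = Counter(_mask(w) for w in words)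
--     items = list(word_count.items())
--
--     result = []
--     for puzzle in puzzles:
--         first_letter = 1 << (ord(puzzle[0]) - ord('a'))
--         puzzle_mask = _mask(puzzle)
--         count = 0
--         for wmask, c in items:
--             if wmask & puzzle_mask == wmask and wmask & first_letter != 0:
--                 count += c
--         result.append(count)
--     return result
-- ===== Notes on version B (the rewrite author's own statement) =====
-- stated objective: alternative
-- what changed: Per puzzle, B scans the table of distinct word bitmasks once and adds the count of each mask that is a submask of the puzzle mask containing its first letter, instead of A's enumeration of all submasks of the puzzle mask via the (subset-1)&mask trick.
import Mathlib
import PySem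

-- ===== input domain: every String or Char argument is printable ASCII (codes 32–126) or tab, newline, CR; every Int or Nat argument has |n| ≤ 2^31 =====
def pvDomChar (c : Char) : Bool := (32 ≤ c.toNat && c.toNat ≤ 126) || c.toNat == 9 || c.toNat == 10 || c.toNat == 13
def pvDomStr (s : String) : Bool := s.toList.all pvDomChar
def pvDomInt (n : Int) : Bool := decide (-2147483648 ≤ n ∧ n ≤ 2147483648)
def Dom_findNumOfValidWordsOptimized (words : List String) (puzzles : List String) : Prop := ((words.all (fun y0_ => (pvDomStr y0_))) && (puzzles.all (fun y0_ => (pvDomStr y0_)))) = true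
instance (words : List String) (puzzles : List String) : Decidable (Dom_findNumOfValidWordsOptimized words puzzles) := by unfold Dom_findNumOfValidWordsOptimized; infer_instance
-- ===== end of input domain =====

-- B replaces A's per-puzzle submask enumeration by a scan of the distinct word-mask table (objective: alternative traversal, same result).

-- ===== PORT A =====
-- shared helper: the letter-bitmask loop both Pythons run over a string's characters
def pvMask (s : String) : Nat :=
  s.toList.foldl (fun m c => m ||| (1 <<< (c.toNat - 97))) 0

-- A's `while subset > 0` submask-enumeration loop
def pvSubLoop (wc : PySem.Dict Nat Int) (fl pmask subset : Nat) (count : Int) : Int :=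
  if 0 < subset then
    pvSubLoop wc fl pmask ((subset - 1) &&& pmask)
      (if subset &&& fl ≠ 0 then count + wc.getD subset 0 else count)
  else count
termination_by subset
decreasing_by have h : subset - 1 &&& pmask ≤ subset - 1 := Nat.and_le_left; omega

def findNumOfValidWordsOptimized (words : List String) (puzzles : List String) : List Int :=
  if words = [] ∨ puzzles = [] then []
  else
    let wc := words.foldl (fun d w => d.modify (pvMask w) 0 (· + 1)) PySem.Dict.empty
    puzzles.map (fun puzzle =>
      let fl : Nat := match puzzle.toList with | c :: _ => 1 <<< (c.toNat - 97) | [] => 0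
      let pm := pvMask puzzle
      pvSubLoop wc fl pm pm 0)

-- ===== PORT B =====
def findNumOfValidWordsOptimized_alt (words : List String) (puzzles : List String) : List Int :=
  if words = [] ∨ puzzles = [] then []
  else
    let items := (PySem.Dict.counter (words.map pvMask)).items
    puzzles.map (fun puzzle =>
      let fl : Nat := match puzzle.toList with | c :: _ => 1 <<< (c.toNat - 97) | [] => 0
      let pm := pvMask puzzle
      items.foldl (fun acc mc =>
        if mc.1 &&& pm = mc.1 ∧ mc.1 &&& fl ≠ 0 then acc + mc.2 else acc) 0)

-- ===== PRECONDITION & SPEC =====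
-- Pre_ excludes exactly the inputs where the Python A raises: unless one of the lists is
-- empty (A returns [] at once), every character must be ≥ 'a' (else `1 << (ord(ch)-97)`
-- raises ValueError on a negative shift) and every puzzle nonempty (else `puzzle[0]`
-- raises IndexError).
def pvLowerStr (s : String) : Bool := s.toList.all (fun c => 97 ≤ c.toNat)

def Pre_findNumOfValidWordsOptimized (words : List String) (puzzles : List String) : Prop :=
  (words.isEmpty || puzzles.isEmpty ||
    (words.all pvLowerStr && puzzles.all (fun p => !p.toList.isEmpty && pvLowerStr p))) = true
instance (words : List String) (puzzles : List String) : Decidable (Pre_findNumOfValidWordsOptimized words puzzles) := by unfold Pre_findNumOfValidWordsOptimized; infer_instance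

def pvWitness_findNumOfValidWordsOptimized : List String × List String := (["ab", "a"], ["abc", "ba"])

def Spec_findNumOfValidWordsOptimized (words : List String) (puzzles : List String) (out : List Int) : Prop := out = findNumOfValidWordsOptimized_alt words puzzles
instance (words : List String) (puzzles : List String) (out : List Int) : Decidable (Spec_findNumOfValidWordsOptimized words puzzles out) := by unfold Spec_findNumOfValidWordsOptimized; infer_instance

-- ===== CLAIM (what is proved, stated in full; the proofs are below) =====
def Claim_equal_findNumOfValidWordsOptimized : Prop := ∀ (words : List String) (puzzles : List String), Dom_findNumOfValidWordsOptimized words puzzles → Pre_findNumOfValidWordsOptimized words puzzles → Spec_findNumOfValidWordsOptimized words puzzles (findNumOfValidWordsOptimized words puzzles)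

-- ===== LEMMAS AND PROOFS =====

-- bit arithmetic: low-bit/high-part decomposition of &&&
theorem pvAnd_mod_two (x y : Nat) : (x &&& y) % 2 = (x % 2) &&& (y % 2) := by
  have h := Nat.testBit_and x y 0
  simp only [Nat.testBit_zero] at h
  have h2 : ((x &&& y) % 2 = 1) ↔ (x % 2 = 1 ∧ y % 2 = 1) := by
    rw [← @decide_eq_true_iff ((x &&& y) % 2 = 1) _, h]; simp
  rcases Nat.mod_two_eq_zero_or_one (x &&& y) with hxy | hxy <;>
    rcases Nat.mod_two_eq_zero_or_one x with hx | hx <;>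
      rcases Nat.mod_two_eq_zero_or_one y with hy | hy <;>
        rw [hxy, hx, hy] <;> rw [hx, hy] at h2 <;> revert h2 <;> rw [hxy] <;> decide

theorem pvAnd_decomp (x y : Nat) : x &&& y = 2 * ((x / 2) &&& (y / 2)) + ((x % 2) &&& (y % 2)) := by
  rw [← pvAnd_mod_two, ← Nat.and_div_two]; omega

-- (s-1) &&& p is the largest submask of p strictly below s (one direction: an upper bound)
theorem pvPred_max (s : Nat) : ∀ p t : Nat, s &&& p = s → t &&& p = t → t < s → t ≤ (s - 1) &&& p := by
  induction s using Nat.strong_induction_on with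
  | _ s ih =>
    intro p t hs ht hlt
    have hs0 : 0 < s := Nat.pos_of_ne_zero (by omega)
    have hdS := pvAnd_decomp s p
    have hdT := pvAnd_decomp t p
    have hbS : (s % 2) &&& (p % 2) ≤ s % 2 := Nat.and_le_left
    have hbT : (t % 2) &&& (p % 2) ≤ t % 2 := Nat.and_le_left
    have haS : (s / 2) &&& (p / 2) ≤ s / 2 := Nat.and_le_left
    have haT : (t / 2) &&& (p / 2) ≤ t / 2 := Nat.and_le_left
    rw [hs] at hdS
    rw [ht] at hdT
    rcases Nat.mod_two_eq_zero_or_one s with hsp | hsp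
    · -- s even: recurse on s/2
      have hs2 : (s / 2) &&& (p / 2) = s / 2 := by omega
      have ht2 : (t / 2) &&& (p / 2) = t / 2 := by omega
      have htm : t % 2 ≤ p % 2 := by
        have h : (t % 2) &&& (p % 2) ≤ p % 2 := Nat.and_le_right; omega
      have hlt2 : t / 2 < s / 2 := by omega
      have hrec := ih (s / 2) (by omega) (p / 2) (t / 2) hs2 ht2 hlt2
      have hd1 := pvAnd_decomp (s - 1) p
      have h12 : (s - 1) / 2 = s / 2 - 1 := by omega
      have h1m : (s - 1) % 2 = 1 := by omega
      rw [h12, h1m] at hd1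
      have hp1 : 1 &&& (p % 2) = p % 2 := by
        rcases Nat.mod_two_eq_zero_or_one p with hp | hp <;> rw [hp] <;> decide
      rw [hp1] at hd1
      omega
    · -- s odd: (s-1) &&& p = s - 1
      have hs2 : (s / 2) &&& (p / 2) = s / 2 := by omega
      have hd1 := pvAnd_decomp (s - 1) p
      have h12 : (s - 1) / 2 = s / 2 := by omega
      have h1m : (s - 1) % 2 = 0 := by omega
      rw [h12, h1m, Nat.zero_and] at hd1
      omega

-- the chain of subsets A's while-loop visits
def pvChain (p subset : Nat) : List Nat :=
  if 0 < subset then subset :: pvChain p ((subset - 1) &&& p) else []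
termination_by subset
decreasing_by have h : subset - 1 &&& p ≤ subset - 1 := Nat.and_le_left; omega

theorem pvChain_mem (p : Nat) (s : Nat) (hs : s &&& p = s) :
    ∀ t, t ∈ pvChain p s ↔ (t &&& p = t ∧ 0 < t ∧ t ≤ s) := by
  induction s using Nat.strong_induction_on with
  | _ s ih =>
    intro t
    rw [pvChain]
    by_cases h0 : 0 < s
    · simp only [if_pos h0, List.mem_cons]
      have hsub : ((s - 1) &&& p) &&& p = (s - 1) &&& p := by
        rw [Nat.and_assoc, Nat.and_self]
      have hlt : (s - 1) &&& p < s := by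
        have h : s - 1 &&& p ≤ s - 1 := Nat.and_le_left; omega
      have ihm := ih ((s - 1) &&& p) hlt (hs := hsub) t
      constructor
      · rintro (rfl | hmem)
        · exact ⟨hs, h0, le_refl _⟩
        · have := ihm.mp hmem; exact ⟨this.1, this.2.1, le_trans this.2.2 (le_of_lt hlt)⟩
      · rintro ⟨htp, ht0, htle⟩
        by_cases heq : t = s
        · exact Or.inl heq
        · exact Or.inr (ihm.mpr ⟨htp, ht0, pvPred_max s p t hs htp (by omega)⟩)
    · simp only [if_neg h0, List.not_mem_nil]
      constructor
      · intro h; exact absurd h (by simp)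
      · intro h; omega

theorem pvChain_le (p s : Nat) : ∀ t ∈ pvChain p s, t ≤ s := by
  induction s using Nat.strong_induction_on with
  | _ s ih =>
    intro t ht
    rw [pvChain] at ht
    by_cases h0 : 0 < s
    · rw [if_pos h0] at ht
      rcases List.mem_cons.mp ht with rfl | hmem
      · exact le_refl _
      · have hlt : (s - 1) &&& p < s := by have h : s - 1 &&& p ≤ s - 1 := Nat.and_le_left; omega
        exact le_trans (ih _ hlt t hmem) (le_of_lt hlt)
    · rw [if_neg h0] at ht; exact absurd ht (by simp)

theorem pvChain_nodup (p s : Nat) : (pvChain p s).Nodup := by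
  induction s using Nat.strong_induction_on with
  | _ s ih =>
    rw [pvChain]
    by_cases h0 : 0 < s
    · rw [if_pos h0]
      have hlt : (s - 1) &&& p < s := by have h : s - 1 &&& p ≤ s - 1 := Nat.and_le_left; omega
      refine List.Nodup.cons ?_ (ih _ hlt)
      intro hmem
      have := pvChain_le p ((s - 1) &&& p) s hmem
      omega
    · rw [if_neg h0]; exact List.nodup_nil

-- A's loop computes the sum of its body over the chain
theorem pvSubLoop_eq (wc : PySem.Dict Nat Int) (fl p : Nat) (s : Nat) :
    ∀ c : Int, pvSubLoop wc fl p s c =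
      c + ((pvChain p s).map (fun t => if t &&& fl ≠ 0 then wc.getD t 0 else 0)).sum := by
  induction s using Nat.strong_induction_on with
  | _ s ih =>
    intro c
    rw [pvSubLoop, pvChain]
    by_cases h0 : 0 < s
    · rw [if_pos h0, if_pos h0]
      have hlt : (s - 1) &&& p < s := by have h : s - 1 &&& p ≤ s - 1 := Nat.and_le_left; omega
      rw [ih _ hlt]
      simp only [List.map_cons, List.sum_cons]
      split_ifs <;> ring
    · rw [if_neg h0, if_neg h0]; simp

-- B's loop computes the sum of its body over the items list
theorem pvFoldB_eq (pm fl : Nat) (l : List (Nat × Int)) :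
    ∀ a : Int, l.foldl (fun acc mc =>
        if mc.1 &&& pm = mc.1 ∧ mc.1 &&& fl ≠ 0 then acc + mc.2 else acc) a =
      a + (l.map (fun mc => if mc.1 &&& pm = mc.1 ∧ mc.1 &&& fl ≠ 0 then mc.2 else 0)).sum := by
  induction l with
  | nil => intro a; simp
  | cons x xs ihl =>
    intro a
    simp only [List.foldl_cons, List.map_cons, List.sum_cons, ihl]
    split_ifs <;> ring

-- the central identity: submask-chain sum = distinct-word-mask scan
theorem pvSum_eq (ms : List Nat) (pm fl : Nat) :
    ((pvChain pm pm).map (fun t => if t &&& fl ≠ 0 then ((ms.count t : Int)) else 0)).sum =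
      ((PySem.Set.ofList ms).map (fun k =>
        if k &&& pm = k ∧ k &&& fl ≠ 0 then ((ms.count k : Int)) else 0)).sum := by
  set g : Nat → Int := fun k => if k &&& pm = k ∧ k &&& fl ≠ 0 then ((ms.count k : Int)) else 0 with hg
  have hself : pm &&& pm = pm := Nat.and_self pm
  have hchainmem := pvChain_mem pm pm hself
  -- on the chain the two bodies agree
  have hmapeq : ((pvChain pm pm).map (fun t => if t &&& fl ≠ 0 then ((ms.count t : Int)) else 0)) =
      (pvChain pm pm).map g := by
    apply List.map_congr_left
    intro t htmem
    have htp := ((hchainmem t).mp htmem).1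
    by_cases hfl : t &&& fl ≠ 0 <;> simp [hg, htp, hfl]
  rw [hmapeq]
  have hnd1 : (pvChain pm pm).Nodup := pvChain_nodup pm pm
  have hnd2 : (PySem.Set.ofList ms).Nodup := PySem.Set.nodup_ofList ms
  rw [← List.sum_toFinset g hnd1, ← List.sum_toFinset g hnd2]
  have hU1 : (pvChain pm pm).toFinset ⊆ (pvChain pm pm).toFinset ∪ (PySem.Set.ofList ms).toFinset :=
    Finset.subset_union_left
  have hU2 : (PySem.Set.ofList ms).toFinset ⊆ (pvChain pm pm).toFinset ∪ (PySem.Set.ofList ms).toFinset :=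
    Finset.subset_union_right
  rw [Finset.sum_subset hU1 ?_, Finset.sum_subset hU2 ?_]
  · -- g vanishes on U \ ofList ms : not a key means count 0
    intro k _ hk
    simp only [List.mem_toFinset] at hk
    have : k ∉ ms := fun hm => hk ((PySem.Set.mem_ofList ms k).mpr hm)
    simp [List.count_eq_zero.mpr this]
  · -- g vanishes on U \ chain : a nonzero submask containing fl is in the chain
    intro k _ hk
    simp only [List.mem_toFinset] at hk
    by_contra hne
    have hcond : k &&& pm = k ∧ k &&& fl ≠ 0 := by
      by_contra hc; exact hne (by simp [hc])
    have hk0 : 0 < k := by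
      rcases Nat.eq_zero_or_pos k with rfl | h
      · exact absurd (Nat.zero_and fl) hcond.2
      · exact h
    have hkle : k ≤ pm := by
      have h : k &&& pm ≤ pm := Nat.and_le_right; omega
    exact hk ((hchainmem k).mpr ⟨hcond.1, hk0, hkle⟩)

-- the two ports agree
theorem pvMain (words puzzles : List String) :
    findNumOfValidWordsOptimized words puzzles = findNumOfValidWordsOptimized_alt words puzzles := by
  unfold findNumOfValidWordsOptimized findNumOfValidWordsOptimized_alt
  by_cases hempty : words = [] ∨ puzzles = []
  · rw [if_pos hempty, if_pos hempty]
  · rw [if_neg hempty, if_neg hempty]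
    apply List.map_congr_left
    intro puzzle _
    set fl : Nat := match puzzle.toList with | c :: _ => 1 <<< (c.toNat - 97) | [] => 0 with hfl
    set pm := pvMask puzzle with hpm
    set ms := words.map pvMask with hms
    -- A's dict lookups are counts of ms
    have hwc : ∀ t, (words.foldl (fun d w => d.modify (pvMask w) 0 (· + 1)) PySem.Dict.empty).getD t 0
        = ((ms.count t : Int)) := by
      intro t
      have hfold : ∀ (l : List String) (d : PySem.Dict Nat Int),
          l.foldl (fun d w => d.modify (pvMask w) 0 (· + 1)) d
            = (l.map pvMask).foldl (fun d x => d.modify x 0 (· + 1)) d := by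
        intro l
        induction l with
        | nil => intro d; rfl
        | cons x xs ih => intro d; simp only [List.foldl_cons, List.map_cons, ih]
      rw [hms, hfold, PySem.Dict.getD_foldl_modify_add_one]
      simp
    rw [pvSubLoop_eq, pvFoldB_eq]
    simp only [zero_add]
    rw [PySem.Dict.items_counter]
    have : (( (PySem.Set.ofList ms).map (fun k => (k, (ms.count k : Int)))).map
        (fun mc => if mc.1 &&& pm = mc.1 ∧ mc.1 &&& fl ≠ 0 then mc.2 else 0)) =
        ((PySem.Set.ofList ms).map (fun k =>
          if k &&& pm = k ∧ k &&& fl ≠ 0 then ((ms.count k : Int)) else 0)) := by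
      rw [List.map_map]; rfl
    rw [this, ← pvSum_eq ms pm fl]
    congr 1
    apply List.map_congr_left
    intro t _
    rw [hwc t]

-- ===== VERDICT (by name: the statement is the Claim_ definition above) =====
theorem findNumOfValidWordsOptimized_spec : Claim_equal_findNumOfValidWordsOptimized := by
  intro words puzzles _ _
  unfold Spec_findNumOfValidWordsOptimized
  exact pvMain words puzzles
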